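-- pv_equiv track=rewrite | github.com/songju7920/codingProblemSolving | 프로그래머스/3/49189. 가장 먼 노드/가장 먼 노드.py | bfs
-- ===== SOURCE A (Python) =====
-- from collections import deque
--
-- def bfs(graph, start, distence):
--     distence[1] = 1
--
--     deq = deque()
--     deq.append(start)
--
--     while deq:
--         next = deq.popleft()
--         for node in graph[next]:
--             if distence[node] == 0:
--                 distence[node] = distence[next] + 1;
--                 deq.append(node);
--
--     return distence.count(max(distence))
-- ===== SOURCE B (Python) =====
-- def bfs(graph, start, distence):
--     # Level-synchronous BFS: whole frontier lists instead of a deque, and the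
--     # final max+count fused into one pass.  Mutates distence like the original.
--     distence[1] = 1
--     frontier = [start]
--     while frontier:
--         nxt = []
--         for node in frontier:
--             for nb in graph[node]:
--                 if distence[nb] == 0:
--                     distence[nb] = distence[node] + 1
--                     nxt.append(nb)
--         frontier = nxt
--     best = distence[0]
--     cnt = 0
--     for v in distence:
--         if v > best:
--             best, cnt = v, 1
--         elif v == best:
--             cnt += 1
--     return cnt
-- ===== Notes on version B (the rewrite author's own statement) =====
-- stated objective: alternative
-- what changed: Replaces the FIFO deque loop by level-synchronous BFS over whole frontier lists (build next_frontier per level, no queue), and fuses the final max(...) and count(...) passes into one running max+count loop.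
-- outside the precondition, e.g. on bfs([[], [0]], -1, [0, 1]): A returns 1, B returns 1; on bfs([[40, 7154], [21, 2], [0, 2], [1, 10, 1]], 2, [-1, 1, 0]): A returns 2, B returns 2
import Mathlib
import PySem

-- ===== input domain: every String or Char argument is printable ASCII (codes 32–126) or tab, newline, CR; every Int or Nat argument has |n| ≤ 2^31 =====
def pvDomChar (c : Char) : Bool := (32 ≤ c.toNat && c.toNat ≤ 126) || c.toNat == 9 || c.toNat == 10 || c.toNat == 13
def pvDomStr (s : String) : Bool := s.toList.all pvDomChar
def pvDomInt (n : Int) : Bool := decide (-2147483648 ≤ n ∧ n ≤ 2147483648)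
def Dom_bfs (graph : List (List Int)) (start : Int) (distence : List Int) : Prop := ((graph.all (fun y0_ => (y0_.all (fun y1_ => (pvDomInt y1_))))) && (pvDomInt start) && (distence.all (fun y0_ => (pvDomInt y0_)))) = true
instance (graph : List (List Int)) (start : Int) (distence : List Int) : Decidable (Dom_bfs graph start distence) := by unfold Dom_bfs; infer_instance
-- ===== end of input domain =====

-- B replaces A's FIFO deque by level-synchronous frontier lists and fuses the final
-- max+count into one pass; both mutate `distence` in place identically in Python
-- (the equivalence proved here is about the return value).

-- ===== PORT A =====
-- inner `for node in graph[next]` body: state = (distence, pushed-to-deque list)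
def pvInnerA (next : Int) (st : List Int × List Int) (node : Int) : List Int × List Int :=
  if PySem.List.pyGetD st.1 node 0 = 0 then
    (PySem.List.pySetD st.1 node (PySem.List.pyGetD st.1 next 0 + 1), st.2 ++ [node])
  else st

-- the `while deq:` loop; one fuel unit per popleft.  Under Pre_bfs every pushed node
-- turns a 0 entry nonzero, so pops ≤ distence.length + 1 and the fuel below suffices.
-- pyGetD defaults ([] / 0) are only reached where Python raises IndexError (outside Pre_bfs).
def pvLoopA (graph : List (List Int)) : Nat → List Int → List Int → List Int
  | 0, _, d => d
  | _ + 1, [], d => d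
  | f + 1, next :: rest, d =>
      let r := (PySem.List.pyGetD graph next []).foldl (pvInnerA next) (d, [])
      pvLoopA graph f (rest ++ r.2) r.1

def bfs (graph : List (List Int)) (start : Int) (distence : List Int) : Int :=
  let d0 := PySem.List.pySetD distence 1 1        -- distence[1] = 1 (IndexError if len < 2: outside Pre_bfs)
  let d := pvLoopA graph (distence.length + 2) [start] d0
  ((PySem.List.count d ((PySem.List.max? d (fun y => y)).getD 0) : Nat) : Int)  -- max([]) raises: outside Pre_bfs

-- ===== PORT B =====
-- inner `for nb in graph[node]` body of Source B: state = (distence, next-frontier)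
def pvNbrB (node : Int) (st : List Int × List Int) (nb : Int) : List Int × List Int :=
  if PySem.List.pyGetD st.1 nb 0 = 0 then
    (PySem.List.pySetD st.1 nb (PySem.List.pyGetD st.1 node 0 + 1), st.2 ++ [nb])
  else st

-- `for node in frontier:` of Source B
def pvLevelB (graph : List (List Int)) (st : List Int × List Int) (node : Int) : List Int × List Int :=
  (PySem.List.pyGetD graph node []).foldl (pvNbrB node) st

-- the `while frontier:` loop; one fuel unit per level (levels ≤ pops, same bound holds)
def pvLoopB (graph : List (List Int)) : Nat → List Int → List Int → List Int
  | 0, _, d => d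
  | _ + 1, [], d => d
  | f + 1, node0 :: rest, d =>
      let r := (node0 :: rest).foldl (pvLevelB graph) (d, [])
      pvLoopB graph f r.2 r.1

-- final single pass of Source B: running (best, cnt)
def pvMaxCntStep (bc : Int × Int) (v : Int) : Int × Int :=
  if v > bc.1 then (v, 1) else if v = bc.1 then (bc.1, bc.2 + 1) else bc

def bfs_alt (graph : List (List Int)) (start : Int) (distence : List Int) : Int :=
  let d0 := PySem.List.pySetD distence 1 1
  let d := pvLoopB graph (distence.length + 2) [start] d0
  (d.foldl pvMaxCntStep (PySem.List.pyGetD d 0 0, 0)).2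

-- ===== PRECONDITION & SPEC =====
-- Pre_ admits the problem's natural domain (an adjacency list of in-range nonnegative node
-- numbers, distence of length ≥ 2 with nonnegative entries) plus every input whose search
-- stops at the first level (all of start's neighbours already nonzero); it excludes deeper
-- searches over malformed graphs, where A can raise IndexError or loop forever and where
-- any value A does return rests on accidental negative-index wraparound (cites in claim.json).
def Pre_bfs (graph : List (List Int)) (start : Int) (distence : List Int) : Prop :=
  2 ≤ distence.length ∧
  ((PySem.Raise.InRange graph.length start ∧
      ∀ v ∈ PySem.List.pyGetD graph start [],
        PySem.Raise.InRange distence.length v ∧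
        PySem.List.pyGetD (PySem.List.pySetD distence 1 1) v 0 ≠ 0) ∨
   (0 ≤ start ∧ start < (graph.length : Int) ∧ start < (distence.length : Int) ∧
    (∀ row ∈ graph, ∀ v ∈ row, 0 ≤ v ∧ v < (graph.length : Int) ∧ v < (distence.length : Int)) ∧
    (∀ v ∈ distence, 0 ≤ v)))
instance (graph : List (List Int)) (start : Int) (distence : List Int) : Decidable (Pre_bfs graph start distence) := by unfold Pre_bfs; infer_instance

def pvWitness_bfs : List (List Int) × Int × List Int := ([[1], [0]], 0, [0, 0])

def Spec_bfs (graph : List (List Int)) (start : Int) (distence : List Int) (out : Int) : Prop := out = bfs_alt graph start distence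
instance (graph : List (List Int)) (start : Int) (distence : List Int) (out : Int) : Decidable (Spec_bfs graph start distence out) := by unfold Spec_bfs; infer_instance

-- ===== CLAIM (what is proved, stated in full; the proofs are below) =====
def Claim_equal_bfs : Prop := ∀ (graph : List (List Int)) (start : Int) (distence : List Int), Dom_bfs graph start distence → Pre_bfs graph start distence → Spec_bfs graph start distence (bfs graph start distence)

-- ===== LEMMAS AND PROOFS =====

-- `distence` entries stay nonnegative, length n; rows carry in-range node numbers
def pvGood (n : Nat) (d : List Int) : Prop := d.length = n ∧ ∀ v ∈ d, 0 ≤ v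
def pvRows (graph : List (List Int)) (n : Nat) : Prop := ∀ row ∈ graph, ∀ v ∈ row, 0 ≤ v ∧ v < (n : Int)

theorem pvNbrB_eq_innerA : @pvNbrB = @pvInnerA := rfl

theorem pvGetD_mem_or {α : Type} (xs : List α) (i : Int) (d : α) :
    PySem.List.pyGetD xs i d ∈ xs ∨ PySem.List.pyGetD xs i d = d := by
  unfold PySem.List.pyGetD PySem.List.pyGet?
  cases h : PySem.List.pyIdx? xs.length i with
  | none => simp
  | some k =>
    cases hk : xs[k]? with
    | none => simp [hk]
    | some v => exact Or.inl (by simp [hk]; exact List.mem_of_getElem? hk)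

theorem pvGetD_nonneg (d : List Int) (h : ∀ v ∈ d, 0 ≤ v) (i : Int) :
    0 ≤ PySem.List.pyGetD d i 0 := by
  rcases pvGetD_mem_or d i 0 with hm | he
  · exact h _ hm
  · omega

theorem pvRowOf (graph : List (List Int)) (n : Nat) (hr : pvRows graph n) (i : Int) :
    ∀ v ∈ PySem.List.pyGetD graph i [], 0 ≤ v ∧ v < (n : Int) := by
  rcases pvGetD_mem_or graph i ([] : List Int) with hm | he
  · exact hr _ hm
  · rw [he]; intro v hv; cases hv

-- accumulator shift for the inner row fold
theorem pvAccRow (nx : Int) (row : List Int) :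
    ∀ (d : List Int) (a : List Int),
      row.foldl (pvInnerA nx) (d, a) =
        ((row.foldl (pvInnerA nx) (d, [])).1, a ++ (row.foldl (pvInnerA nx) (d, [])).2) := by
  induction row with
  | nil => intro d a; simp
  | cons x t ih =>
    intro d a
    by_cases hc : PySem.List.pyGetD d x 0 = 0
    · simp only [List.foldl_cons, pvInnerA, hc, if_pos]
      rw [ih _ (a ++ [x]), ih _ ([] ++ [x])]
      simp
    · simp only [List.foldl_cons, pvInnerA, hc, if_neg, not_false_iff]
      exact ih d a

-- accumulator shift for the per-level fold
theorem pvAccQ (graph : List (List Int)) (q : List Int) :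
    ∀ (d : List Int) (a : List Int),
      q.foldl (pvLevelB graph) (d, a) =
        ((q.foldl (pvLevelB graph) (d, [])).1, a ++ (q.foldl (pvLevelB graph) (d, [])).2) := by
  induction q with
  | nil => intro d a; simp
  | cons x t ih =>
    intro d a
    simp only [List.foldl_cons, pvLevelB, pvNbrB_eq_innerA]
    rw [pvAccRow x _ d a, pvAccRow x _ d []]
    simp only [List.nil_append]
    rw [ih _ (a ++ (List.foldl (pvInnerA x) (d, []) (PySem.List.pyGetD graph x [])).2),
        ih _ (List.foldl (pvInnerA x) (d, []) (PySem.List.pyGetD graph x [])).2]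
    simp

-- A's deque loop, split: processing the first q elements equals one level fold
theorem pvSplitA (graph : List (List Int)) (q : List Int) :
    ∀ (p : List Int) (f : Nat) (d : List Int),
      pvLoopA graph (q.length + f) (q ++ p) d =
        pvLoopA graph f (p ++ (q.foldl (pvLevelB graph) (d, [])).2)
          (q.foldl (pvLevelB graph) (d, [])).1 := by
  induction q with
  | nil => intro p f d; simp
  | cons x t ih =>
    intro p f d
    have hstep : pvLoopA graph (t.length + f + 1) (x :: (t ++ p)) d =
        pvLoopA graph (t.length + f)
          ((t ++ p) ++ ((PySem.List.pyGetD graph x []).foldl (pvInnerA x) (d, [])).2)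
          ((PySem.List.pyGetD graph x []).foldl (pvInnerA x) (d, [])).1 := rfl
    have hlen : (x :: t).length + f = t.length + f + 1 := by simp; omega
    rw [List.cons_append, hlen, hstep]
    set R := (PySem.List.pyGetD graph x []).foldl (pvInnerA x) (d, []) with hR
    rw [List.append_assoc, ih (p ++ R.2) f R.1]
    have hfold : (x :: t).foldl (pvLevelB graph) (d, []) =
        ((t.foldl (pvLevelB graph) (R.1, [])).1, R.2 ++ (t.foldl (pvLevelB graph) (R.1, [])).2) := by
      simp only [List.foldl_cons, pvLevelB, pvNbrB_eq_innerA, ← hR]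
      rw [show R = (R.1, R.2) from rfl, pvAccQ]
    rw [hfold]
    simp

-- bookkeeping for one row fold: goodness is preserved and every push kills one zero
theorem pvRowBook (n : Nat) (nx : Int) (row : List Int)
    (hrow : ∀ v ∈ row, 0 ≤ v ∧ v < (n : Int)) :
    ∀ d : List Int, pvGood n d →
      pvGood n (row.foldl (pvInnerA nx) (d, [])).1 ∧
      (row.foldl (pvInnerA nx) (d, [])).1.count 0 + (row.foldl (pvInnerA nx) (d, [])).2.length
        = d.count 0 := by
  induction row with
  | nil => intro d hd; exact ⟨hd, rfl⟩
  | cons x t ih =>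
    intro d hd
    have hx := hrow x (by simp)
    have ht : ∀ v ∈ t, 0 ≤ v ∧ v < (n : Int) := fun v hv => hrow v (by simp [hv])
    by_cases hc : PySem.List.pyGetD d x 0 = 0
    · have hxlt : x.toNat < d.length := by
        have := hd.1; omega
      have hset : PySem.List.pySetD d x (PySem.List.pyGetD d nx 0 + 1) =
          d.set x.toNat (PySem.List.pyGetD d nx 0 + 1) :=
        PySem.List.pySetD_of_nonneg d _ hx.1
      set v := PySem.List.pyGetD d nx 0 + 1 with hv
      have hvpos : 0 < v := by
        have := pvGetD_nonneg d hd.2 nx; omega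
      have hd' : pvGood n (d.set x.toNat v) := by
        constructor
        · simp [hd.1]
        · intro w hw
          rcases List.mem_or_eq_of_mem_set hw with h | h
          · exact hd.2 _ h
          · omega
      have hget : d[x.toNat] = (0 : Int) := by
        rw [← PySem.List.pyGetD_eq_getElem d 0 hx.1 (by rw [hd.1]; exact hx.2)]
        exact hc
      have hcount : (d.set x.toNat v).count 0 + 1 = d.count 0 := by
        have hcpos : 0 < List.count 0 d := by
          rw [List.count_pos_iff]
          exact hget ▸ List.getElem_mem hxlt
        have hset' := List.count_set (a := v) (b := (0 : Int)) (l := d) (i := x.toNat) hxlt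
        rw [hget] at hset'
        simp [hvpos.ne'] at hset'
        omega
      simp only [List.foldl_cons, pvInnerA, hc, if_pos, hset, ← hv]
      rw [pvAccRow nx t _ ([] ++ [x])]
      rcases ih ht _ hd' with ⟨hg, hcnt⟩
      refine ⟨hg, ?_⟩
      simp only [List.length_append, List.length_cons, List.length_nil]
      omega
    · simp only [List.foldl_cons, pvInnerA, hc, if_neg, not_false_iff]
      exact ih ht d hd

-- bookkeeping for a whole level
theorem pvQBook (graph : List (List Int)) (n : Nat) (hr : pvRows graph n) (q : List Int) :
    ∀ d : List Int, pvGood n d →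
      pvGood n (q.foldl (pvLevelB graph) (d, [])).1 ∧
      (q.foldl (pvLevelB graph) (d, [])).1.count 0 + (q.foldl (pvLevelB graph) (d, [])).2.length
        = d.count 0 := by
  induction q with
  | nil => intro d hd; exact ⟨hd, rfl⟩
  | cons x t ih =>
    intro d hd
    have hrow := pvRowOf graph n hr x
    rcases pvRowBook n x _ hrow d hd with ⟨hg1, hc1⟩
    simp only [List.foldl_cons, pvLevelB, pvNbrB_eq_innerA]
    set R := (PySem.List.pyGetD graph x []).foldl (pvInnerA x) (d, []) with hR
    rw [show R = (R.1, R.2) from rfl, pvAccQ]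
    rcases ih R.1 hg1 with ⟨hg2, hc2⟩
    refine ⟨hg2, ?_⟩
    simp only [List.length_append]
    omega

theorem pvLoopA_nil (graph : List (List Int)) (f : Nat) (d : List Int) :
    pvLoopA graph f [] d = d := by cases f <;> rfl

theorem pvLoopB_nil (graph : List (List Int)) (f : Nat) (d : List Int) :
    pvLoopB graph f [] d = d := by cases f <;> rfl

-- MAIN: with enough fuel on both sides the two loops agree
theorem pvMain (graph : List (List Int)) (n : Nat) (hr : pvRows graph n) :
    ∀ (z : Nat) (d q : List Int) (f g : Nat), pvGood n d →
      d.count 0 ≤ z → d.count 0 + q.length + 1 ≤ f → d.count 0 + 1 ≤ g →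
      pvLoopA graph f q d = pvLoopB graph g q d := by
  intro z
  induction z with
  | zero =>
    intro d q f g hd hz hf hg
    cases q with
    | nil => rw [pvLoopA_nil, pvLoopB_nil]
    | cons x t =>
      rcases pvQBook graph n hr (x :: t) d hd with ⟨hg1, hc1⟩
      set Q := (x :: t).foldl (pvLevelB graph) (d, []) with hQ
      have hQ2 : Q.2 = [] := by
        have : Q.2.length = 0 := by omega
        exact List.eq_nil_of_length_eq_zero this
      obtain ⟨f0, hf0⟩ : ∃ f0, f = (x :: t).length + f0 :=
        ⟨f - (x :: t).length, by simp at hf ⊢; omega⟩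
      have hsplit := pvSplitA graph (x :: t) [] f0 d
      rw [List.append_nil, List.nil_append] at hsplit
      rw [hf0, hsplit, ← hQ]
      obtain ⟨g', rfl⟩ : ∃ g', g = g' + 1 := ⟨g - 1, by omega⟩
      have hB : pvLoopB graph (g' + 1) (x :: t) d = pvLoopB graph g' Q.2 Q.1 := rfl
      rw [hB, hQ2]
      simp [pvLoopA_nil, pvLoopB_nil]
  | succ z ih =>
    intro d q f g hd hz hf hg
    cases q with
    | nil => rw [pvLoopA_nil, pvLoopB_nil]
    | cons x t =>
      rcases pvQBook graph n hr (x :: t) d hd with ⟨hg1, hc1⟩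
      set Q := (x :: t).foldl (pvLevelB graph) (d, []) with hQ
      obtain ⟨f0, hf0⟩ : ∃ f0, f = (x :: t).length + f0 :=
        ⟨f - (x :: t).length, by simp at hf ⊢; omega⟩
      have hsplit := pvSplitA graph (x :: t) [] f0 d
      rw [List.append_nil, List.nil_append] at hsplit
      rw [hf0, hsplit, ← hQ]
      obtain ⟨g', rfl⟩ : ∃ g', g = g' + 1 := ⟨g - 1, by omega⟩
      have hB : pvLoopB graph (g' + 1) (x :: t) d = pvLoopB graph g' Q.2 Q.1 := rfl
      rw [hB]
      cases hQ2 : Q.2 with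
      | nil => simp [pvLoopA_nil, pvLoopB_nil]
      | cons y s =>
        have hlen : Q.2.length = s.length + 1 := by rw [hQ2]; simp
        rw [← hQ2]
        exact ih Q.1 Q.2 _ _ hg1 (by omega) (by omega) (by omega)

-- the loops preserve the length of distence
theorem pvLenRow (nx : Int) (row : List Int) :
    ∀ (st : List Int × List Int), ((row.foldl (pvInnerA nx) st).1).length = st.1.length := by
  induction row with
  | nil => intro st; rfl
  | cons x t ih =>
    intro st
    by_cases hc : PySem.List.pyGetD st.1 x 0 = 0
    · simp only [List.foldl_cons, pvInnerA, hc, if_pos]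
      rw [ih]
      simp [PySem.List.length_pySetD]
    · simp only [List.foldl_cons, pvInnerA, hc, if_neg, not_false_iff]
      exact ih st

theorem pvLenQ (graph : List (List Int)) (q : List Int) :
    ∀ (st : List Int × List Int), ((q.foldl (pvLevelB graph) st).1).length = st.1.length := by
  induction q with
  | nil => intro st; rfl
  | cons x t ih =>
    intro st
    simp only [List.foldl_cons, pvLevelB, pvNbrB_eq_innerA]
    rw [ih, pvLenRow]

theorem pvLenB (graph : List (List Int)) :
    ∀ (g : Nat) (q d : List Int), (pvLoopB graph g q d).length = d.length := by
  intro g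
  induction g with
  | zero => intro q d; rfl
  | succ g ih =>
    intro q d
    cases q with
    | nil => rfl
    | cons x t =>
      show (pvLoopB graph g _ _).length = d.length
      rw [ih, pvLenQ]

-- the fused max+count pass computes (running max, count of it)
theorem pvFoldMC (t : List Int) :
    ∀ (b c : Int),
      t.foldl pvMaxCntStep (b, c) =
        (t.foldl max b,
         (if t.foldl max b = b then c else 0) + ((t.count (t.foldl max b) : Nat) : Int)) := by
  induction t with
  | nil => intro b c; simp
  | cons v t ih =>
    intro b c
    rcases lt_trichotomy b v with hbv | hbv | hbv
    · have hstep : pvMaxCntStep (b, c) v = (v, 1) := by simp [pvMaxCntStep, hbv]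
      have hmax : max b v = v := max_eq_right hbv.le
      simp only [List.foldl_cons, hstep, ih v 1, hmax]
      have hvle := (PySem.List.le_foldl_max t v).1
      have hM : t.foldl max v ≠ b := by omega
      rw [List.count_cons]
      simp only [hM, if_neg, not_false_iff]
      by_cases h : t.foldl max v = v
      · simp [h, eq_comm]
        ring
      · have : ¬ (v = t.foldl max v) := fun hh => h hh.symm
        simp [h, this]
    · have hstep : pvMaxCntStep (b, c) v = (b, c + 1) := by simp [pvMaxCntStep, hbv]
      have hmax : max b v = b := by rw [hbv, max_self]
      simp only [List.foldl_cons, hstep, ih b (c + 1), hmax]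
      rw [List.count_cons]
      subst hbv
      by_cases h : t.foldl max b = b
      · simp [h]
        ring
      · have : ¬ (b = t.foldl max b) := fun hh => h hh.symm
        simp [h, this]
    · have hstep : pvMaxCntStep (b, c) v = (b, c) := by
        have h1 : ¬ (v > b) := by omega
        have h2 : ¬ (v = b) := by omega
        simp [pvMaxCntStep, h1, h2]
      have hmax : max b v = b := max_eq_left hbv.le
      simp only [List.foldl_cons, hstep, ih b c, hmax]
      rw [List.count_cons]
      have hble := (PySem.List.le_foldl_max t b).1
      have hvM : ¬ (v = t.foldl max b) := by omega
      simp [hvM]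

-- on a nonempty list the fused pass equals count(max(...))
theorem pvFinal (d : List Int) (h : d ≠ []) :
    (d.foldl pvMaxCntStep (PySem.List.pyGetD d 0 0, 0)).2 =
      ((PySem.List.count d ((PySem.List.max? d (fun y => y)).getD 0) : Nat) : Int) := by
  cases d with
  | nil => exact absurd rfl h
  | cons x t =>
    rw [PySem.List.max?_id_cons, PySem.List.count_eq]
    have hget : PySem.List.pyGetD (x :: t) 0 0 = x := by
      rw [PySem.List.pyGetD_eq_getElem (x :: t) (i := 0) 0 (by omega)
        (by exact_mod_cast t.length.succ_pos)]
      rfl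
    rw [hget]
    have hstep : pvMaxCntStep (x, 0) x = (x, 1) := by simp [pvMaxCntStep]
    simp only [List.foldl_cons, hstep, Option.getD_some]
    rw [pvFoldMC t x 1, List.count_cons]
    have hxle := (PySem.List.le_foldl_max t x).1
    by_cases hM : t.foldl max x = x
    · simp [hM, eq_comm]
      ring
    · have : ¬ (x = t.foldl max x) := fun hh => hM hh.symm
      simp [hM, this]

-- a row none of whose neighbours is at distance 0 pushes nothing and writes nothing
theorem pvRowStall (nx : Int) (row : List Int) :
    ∀ (d a : List Int), (∀ v ∈ row, PySem.List.pyGetD d v 0 ≠ 0) →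
      row.foldl (pvInnerA nx) (d, a) = (d, a) := by
  induction row with
  | nil => intro d a _; rfl
  | cons x t ih =>
    intro d a h
    have hx : PySem.List.pyGetD d x 0 ≠ 0 := h x (by simp)
    simp only [List.foldl_cons, pvInnerA, hx, if_neg, not_false_iff]
    exact ih d a (fun v hv => h v (by simp [hv]))

-- ===== VERDICT (by name: the statement is the Claim_ definition above) =====
theorem bfs_spec : Claim_equal_bfs := by
  intro graph start distence _hdom hpre
  obtain ⟨hlen, hbr⟩ := hpre
  unfold Spec_bfs bfs bfs_alt
  dsimp only
  set n := distence.length with hn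
  set d0 := PySem.List.pySetD distence 1 1 with hd0
  have hlen0 : d0.length = n := by rw [hd0, PySem.List.length_pySetD]
  have hne : ∀ dx : List Int, dx.length = n → dx ≠ [] := by
    intro dx hdx hnil
    rw [hnil] at hdx
    simp at hdx
    omega
  have hloop : pvLoopA graph (n + 2) [start] d0 = pvLoopB graph (n + 2) [start] d0 := by
    rcases hbr with ⟨_hsr, hrow⟩ | ⟨hs0, hsg, hsd, hrows, hnn⟩
    · -- the search stops at the first level: one row scan, no pushes
      have hstall : (PySem.List.pyGetD graph start []).foldl (pvInnerA start) (d0, []) = (d0, []) :=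
        pvRowStall start _ d0 [] (fun v hv => (hrow v hv).2)
      have hA : pvLoopA graph (n + 2) [start] d0 =
          pvLoopA graph (n + 1)
            ([] ++ ((PySem.List.pyGetD graph start []).foldl (pvInnerA start) (d0, [])).2)
            ((PySem.List.pyGetD graph start []).foldl (pvInnerA start) (d0, [])).1 := rfl
      have hB : pvLoopB graph (n + 2) [start] d0 =
          pvLoopB graph (n + 1)
            ([start].foldl (pvLevelB graph) (d0, [])).2
            ([start].foldl (pvLevelB graph) (d0, [])).1 := rfl
      have hlev : [start].foldl (pvLevelB graph) (d0, []) = (d0, []) := by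
        simp only [List.foldl_cons, List.foldl_nil, pvLevelB, pvNbrB_eq_innerA]
        exact hstall
      rw [hA, hB, hstall, hlev]
      simp [pvLoopA_nil, pvLoopB_nil]
    · -- the well-formed domain: the zero-count fuel argument
      have hrows' : pvRows graph n := fun row hrow v hv => ⟨(hrows row hrow v hv).1, (hrows row hrow v hv).2.2⟩
      have hgood : pvGood n d0 := by
        refine ⟨hlen0, ?_⟩
        intro v hv
        rw [hd0, PySem.List.pySetD_of_nonneg distence 1 (by omega)] at hv
        rcases List.mem_or_eq_of_mem_set hv with h | h
        · exact hnn _ h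
        · omega
      have hcle : d0.count 0 ≤ n := by
        have h1 := List.count_le_length (l := d0) (a := (0 : Int))
        omega
      exact pvMain graph n hrows' n d0 [start] (n + 2) (n + 2) hgood hcle (by simp; omega) (by omega)
  rw [hloop]
  set dfin := pvLoopB graph (n + 2) [start] d0 with hdfin
  have hfin : dfin ≠ [] := by
    refine hne dfin ?_
    rw [hdfin, pvLenB, hlen0]
  exact (pvFinal dfin hfin).symm
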